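-- pv_equiv track=rewrite | github.com/ToniFer03/Rede-Neural | game_rules.py | verifica_existencia_macro_traco
-- ===== SOURCE A (Python) =====
-- figuras_disponiveis = ['X', 'O', '+', '-']
--
-- posicoes_traco = [
--     [(0, 0), (1, 0), (2, 0)],
--     [(1, 0), (2, 0), (3, 0)],
--     [(2, 0), (3, 0), (4, 0)],
--     [(0, 1), (1, 1), (2, 1)],
--     [(1, 1), (2, 1), (3, 1)],
--     [(2, 1), (3, 1), (4, 1)],
--     [(0, 2), (1, 2), (2, 2)],
--     [(1, 2), (2, 2), (3, 2)],
--     [(2, 2), (3, 2), (4, 2)],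
--     [(0, 3), (1, 3), (2, 3)],
--     [(1, 3), (2, 3), (3, 3)],
--     [(2, 3), (3, 3), (4, 3)],
--     [(0, 4), (1, 4), (2, 4)],
--     [(1, 4), (2, 4), (3, 4)],
--     [(2, 4), (3, 4), (4, 4)],
--     [(0, 0), (1, 0)],
--     [(1, 0), (2, 0)],
--     [(2, 0), (3, 0)],
--     [(3, 0), (4, 0)],
--     [(0, 1), (1, 1)],
--     [(1, 1), (2, 1)],
--     [(2, 1), (3, 1)],
--     [(3, 1), (4, 1)],
--     [(0, 2), (1, 2)],
--     [(1, 2), (2, 2)],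
--     [(2, 2), (3, 2)],
--     [(3, 2), (4, 2)],
--     [(0, 3), (1, 3)],
--     [(1, 3), (2, 3)],
--     [(2, 3), (3, 3)],
--     [(3, 3), (4, 3)],
--     [(0, 4), (1, 4)],
--     [(1, 4), (2, 4)],
--     [(2, 4), (3, 4)],
--     [(3, 4), (4, 4)],
-- ]
--
-- def verifica_existencia_macro_traco(tabuleiro_temp):
--     """
--         Verifies if there is a Dash formed by 3 pieces
--
--         Parameters
--         ----------
--         tabuleiro_temp
--             Object that contains a copy of the current state of the board
--
--         Returns
--         -------
--         boolean
--             Returns a boolean indicating if a certain figure was formed or not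
--
--     """
--     temp_posicao = posicoes_traco[:15]
--
--     for lista_posicao in temp_posicao:
--         num_correspondecias = 0
--         for posicao in lista_posicao:
--             if tabuleiro_temp[posicao[0]][posicao[1]] == figuras_disponiveis[3]:
--                 num_correspondecias += 1
--             else:
--                 break
--
--             if num_correspondecias == 3:
--                 return True
--
--     return False
-- ===== SOURCE B (Python) =====
-- def verifica_existencia_macro_traco(tabuleiro_temp):
--     """Run-length scan: for each column, count consecutive '-' cells down the rows."""
--     for y in range(5):
--         corrida = 0
--         for x in range(5):
--             if tabuleiro_temp[x][y] == '-':
--                 corrida += 1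
--                 if corrida == 3:
--                     return True
--             else:
--                 corrida = 0
--     return False
-- ===== Notes on version B (the rewrite author's own statement) =====
-- stated objective: simpler
-- what changed: Replaces the hardcoded 15-window position table and per-window counting with a direct run-length scan: for each of the 5 columns, walk the 5 rows keeping a count of consecutive '-' cells, returning True when it reaches 3.
-- outside the precondition, e.g. on verifica_existencia_macro_traco([['-', '-', '-'], ['X', '-', '-'], ['X', '-', '-']]): A returns True, B raises IndexError
import Mathlib
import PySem

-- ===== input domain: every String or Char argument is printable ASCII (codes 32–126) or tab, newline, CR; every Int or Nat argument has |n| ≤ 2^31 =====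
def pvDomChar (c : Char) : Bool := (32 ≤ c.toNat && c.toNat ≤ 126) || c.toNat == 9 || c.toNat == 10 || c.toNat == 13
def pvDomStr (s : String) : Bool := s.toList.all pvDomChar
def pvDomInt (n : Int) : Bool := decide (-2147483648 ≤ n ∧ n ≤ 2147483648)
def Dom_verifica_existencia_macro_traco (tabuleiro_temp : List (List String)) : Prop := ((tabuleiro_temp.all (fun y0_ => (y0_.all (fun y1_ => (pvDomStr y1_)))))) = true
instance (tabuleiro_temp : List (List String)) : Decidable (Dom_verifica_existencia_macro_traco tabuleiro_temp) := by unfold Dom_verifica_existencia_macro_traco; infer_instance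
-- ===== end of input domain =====

-- B replaces A's hardcoded 15-window table by a per-column run-length scan of consecutive '-' cells; same result on every proper 5x5 board.


-- ===== PORT A =====
-- posicoes_traco[:15] — the 15 vertical length-3 windows, as in the Python table
def posicoes_traco15 : List (List (Int × Int)) :=
  [ [(0, 0), (1, 0), (2, 0)], [(1, 0), (2, 0), (3, 0)], [(2, 0), (3, 0), (4, 0)],
    [(0, 1), (1, 1), (2, 1)], [(1, 1), (2, 1), (3, 1)], [(2, 1), (3, 1), (4, 1)],
    [(0, 2), (1, 2), (2, 2)], [(1, 2), (2, 2), (3, 2)], [(2, 2), (3, 2), (4, 2)],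
    [(0, 3), (1, 3), (2, 3)], [(1, 3), (2, 3), (3, 3)], [(2, 3), (3, 3), (4, 3)],
    [(0, 4), (1, 4), (2, 4)], [(1, 4), (2, 4), (3, 4)], [(2, 4), (3, 4), (4, 4)] ]

-- inner 'for posicao in lista_posicao' with break / early return (cell access is
-- tabuleiro_temp[x][y]; total via pyGetD, exact under Pre_)
def checaJanela (tabuleiro_temp : List (List String)) (ps : List (Int × Int)) (num : Int) : Bool :=
  match ps with
  | [] => false
  | p :: rest =>
    if PySem.List.pyGetD (PySem.List.pyGetD tabuleiro_temp p.1 []) p.2 "" == "-" then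
      if num + 1 == 3 then true else checaJanela tabuleiro_temp rest (num + 1)
    else false

-- outer 'for lista_posicao in temp_posicao' with early return
def loopJanelas (tabuleiro_temp : List (List String)) (ws : List (List (Int × Int))) : Bool :=
  match ws with
  | [] => false
  | w :: rest =>
    if checaJanela tabuleiro_temp w 0 then true else loopJanelas tabuleiro_temp rest

def verifica_existencia_macro_traco (tabuleiro_temp : List (List String)) : Bool :=
  loopJanelas tabuleiro_temp posicoes_traco15

-- ===== PORT B =====
-- inner 'for x in range(5)' with running count of consecutive '-' cells
def varreColuna (tabuleiro_temp : List (List String)) (y : Int) (xs : List Int) (corrida : Int) : Bool :=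
  match xs with
  | [] => false
  | x :: rest =>
    if PySem.List.pyGetD (PySem.List.pyGetD tabuleiro_temp x []) y "" == "-" then
      if corrida + 1 == 3 then true else varreColuna tabuleiro_temp y rest (corrida + 1)
    else varreColuna tabuleiro_temp y rest 0

-- outer 'for y in range(5)'
def loopColunas (tabuleiro_temp : List (List String)) (ys : List Int) : Bool :=
  match ys with
  | [] => false
  | y :: rest =>
    if varreColuna tabuleiro_temp y (PySem.List.pyRange 0 5 1) 0 then true
    else loopColunas tabuleiro_temp rest

def verifica_existencia_macro_traco_alt (tabuleiro_temp : List (List String)) : Bool :=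
  loopColunas tabuleiro_temp (PySem.List.pyRange 0 5 1)

-- ===== PRECONDITION & SPEC =====
-- Pre_ is the game's natural domain, a proper 5x5 board (at least 5 rows whose first 5
-- rows have at least 5 entries).  It excludes ragged/short boards, on which A may raise
-- IndexError, and on some of which A happens to return only because its early 'break'
-- skips the missing cells while B's full column scan raises there.
def Pre_verifica_existencia_macro_traco (tabuleiro_temp : List (List String)) : Prop :=
  5 ≤ tabuleiro_temp.length ∧ ∀ r ∈ tabuleiro_temp.take 5, 5 ≤ r.length
instance (tabuleiro_temp : List (List String)) : Decidable (Pre_verifica_existencia_macro_traco tabuleiro_temp) := by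
  unfold Pre_verifica_existencia_macro_traco; infer_instance

def pvWitness_verifica_existencia_macro_traco : List (List String) :=
  [["-", "X", "O", "+", "-"], ["-", "X", "O", "+", "-"], ["-", "X", "O", "+", "-"],
   ["X", "X", "O", "+", "-"], ["X", "X", "O", "+", "-"]]

def Spec_verifica_existencia_macro_traco (tabuleiro_temp : List (List String)) (out : Bool) : Prop := out = verifica_existencia_macro_traco_alt tabuleiro_temp
instance (tabuleiro_temp : List (List String)) (out : Bool) : Decidable (Spec_verifica_existencia_macro_traco tabuleiro_temp out) := by unfold Spec_verifica_existencia_macro_traco; infer_instance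

-- ===== CLAIM (what is proved, stated in full; the proofs are below) =====
def Claim_equal_verifica_existencia_macro_traco : Prop := ∀ (tabuleiro_temp : List (List String)), Dom_verifica_existencia_macro_traco tabuleiro_temp → Pre_verifica_existencia_macro_traco tabuleiro_temp → Spec_verifica_existencia_macro_traco tabuleiro_temp (verifica_existencia_macro_traco tabuleiro_temp)

-- ===== LEMMAS AND PROOFS =====

theorem pv_colchain : ∀ (p q r s t rest : Bool),
    (p && (q && r) || (q && (r && s) || (r && (s && t) || rest)))
      = (cond p (cond q r (r && (s && t))) (cond q (r && s) (r && (s && t))) || rest) := by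
  decide

theorem pv_collast : ∀ (p q r s t : Bool),
    (p && (q && r) || (q && (r && s) || r && (s && t)))
      = cond p (cond q r (r && (s && t))) (cond q (r && s) (r && (s && t))) := by
  decide

-- ===== VERDICT (by name: the statement is the Claim_ definition above) =====
theorem verifica_existencia_macro_traco_spec : Claim_equal_verifica_existencia_macro_traco := by
  intro t _ hpre
  obtain ⟨hlen, hrows⟩ := hpre
  rcases t with _|⟨r0,_|⟨r1,_|⟨r2,_|⟨r3,_|⟨r4,rest⟩⟩⟩⟩⟩ <;> simp at hlen
  have h0 : 5 ≤ r0.length := hrows r0 (by simp)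
  have h1 : 5 ≤ r1.length := hrows r1 (by simp)
  have h2 : 5 ≤ r2.length := hrows r2 (by simp)
  have h3 : 5 ≤ r3.length := hrows r3 (by simp)
  have h4 : 5 ≤ r4.length := hrows r4 (by simp)
  clear hrows hlen
  rcases r0 with _|⟨a0,_|⟨a1,_|⟨a2,_|⟨a3,_|⟨a4,ar⟩⟩⟩⟩⟩ <;> simp at h0
  rcases r1 with _|⟨b0,_|⟨b1,_|⟨b2,_|⟨b3,_|⟨b4,br⟩⟩⟩⟩⟩ <;> simp at h1
  rcases r2 with _|⟨c0,_|⟨c1,_|⟨c2,_|⟨c3,_|⟨c4,cr⟩⟩⟩⟩⟩ <;> simp at h2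
  rcases r3 with _|⟨d0,_|⟨d1,_|⟨d2,_|⟨d3,_|⟨d4,dr⟩⟩⟩⟩⟩ <;> simp at h3
  rcases r4 with _|⟨e0,_|⟨e1,_|⟨e2,_|⟨e3,_|⟨e4,er⟩⟩⟩⟩⟩ <;> simp at h4
  show verifica_existencia_macro_traco _ = verifica_existencia_macro_traco_alt _
  have hr : PySem.List.pyRange 0 5 1 = [0,1,2,3,4] := by decide
  simp only [verifica_existencia_macro_traco, verifica_existencia_macro_traco_alt, hr,
    loopJanelas, checaJanela, posicoes_traco15, loopColunas, varreColuna]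
  simp only [PySem.List.pyGetD_ofNat', List.getD]
  norm_num
  simp only [← Bool.cond_decide]
  rw [pv_colchain, pv_colchain, pv_colchain, pv_colchain, pv_collast]
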